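-- pv_equiv track=rewrite | github.com/EricEdu/TkinterTrabalho | teste.py | VerificarCPF
-- ===== SOURCE A (Python) =====
-- def VerificarCPF(CPF):
--     # CPF deve ser na forma "123.456.789-10"
--     if len(CPF) != 14:
--         return False
--     partes = CPF.split(".")
--     if len(partes) != 3:
--         return False
--     for parte in partes[:2]:
--         if len(parte) != 3 or not parte.isdigit():
--             return False
--     parte3 = partes[2].split("-")
--     if len(parte3) != 2 or len(parte3[0]) != 3 or not parte3[0].isdigit() or len(parte3[1]) != 2 or not parte3[1].isdigit():
--         return False
--     return True
-- ===== SOURCE B (Python) =====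
-- def VerificarCPF(CPF):
--     # one positional scan over the 14-char CPF template: separators at 3, 7, 11, digits elsewhere
--     if len(CPF) != 14:
--         return False
--     for i, ch in enumerate(CPF):
--         if i == 3 or i == 7:
--             if ch != '.':
--                 return False
--         elif i == 11:
--             if ch != '-':
--                 return False
--         elif not ch.isdigit():
--             return False
--     return True
-- ===== Notes on version B (the rewrite author's own statement) =====
-- stated objective: simpler
-- what changed: Replaces the split-on-dot / split-on-dash parsing with length and digit re-checks of each piece by a single positional scan of the 14-character CPF template: separators checked at positions 3, 7 and 11, every other character checked per-char with isdigit.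
import Mathlib
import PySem

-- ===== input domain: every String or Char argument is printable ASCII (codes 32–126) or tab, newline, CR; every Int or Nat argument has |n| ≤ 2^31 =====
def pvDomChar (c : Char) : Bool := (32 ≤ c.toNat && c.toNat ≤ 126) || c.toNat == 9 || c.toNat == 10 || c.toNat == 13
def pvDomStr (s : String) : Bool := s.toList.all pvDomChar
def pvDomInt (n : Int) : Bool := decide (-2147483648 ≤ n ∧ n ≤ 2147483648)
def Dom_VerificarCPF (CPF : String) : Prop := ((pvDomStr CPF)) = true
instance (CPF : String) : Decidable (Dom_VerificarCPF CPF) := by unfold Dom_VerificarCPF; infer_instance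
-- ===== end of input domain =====

-- B replaces A's split-on-separator parsing by a single positional scan of the 14-char CPF template (simpler, same cost).


-- ===== PORT A =====
-- helper: the loop 'for parte in partes[:2]' with its early 'return False'
def pvA_parts2 : List (List Char) → Bool
  | [] => true
  | p :: rest =>
    if p.length ≠ 3 || !PySem.Chars.strIsdigit p then false else pvA_parts2 rest

-- transliteration of A on CPF.toList (string ops are the PySem.Chars forms);
-- the getD indices 2, 0, 1 are guarded by the preceding length checks, as in A
def VerificarCPF (CPF : String) : Bool :=
  if CPF.toList.length ≠ 14 then false
  else
    let partes := PySem.Chars.splitOn CPF.toList ['.']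
    if partes.length ≠ 3 then false
    else if pvA_parts2 (partes.take 2) = false then false
    else
      let parte3 := PySem.Chars.splitOn (partes.getD 2 []) ['-']
      if parte3.length ≠ 2 || (parte3.getD 0 []).length ≠ 3 ||
         !PySem.Chars.strIsdigit (parte3.getD 0 []) || (parte3.getD 1 []).length ≠ 2 ||
         !PySem.Chars.strIsdigit (parte3.getD 1 []) then false
      else true

-- ===== PORT B =====
-- the 'for i, ch in enumerate(CPF)' positional scan with early 'return False'
def pvB_loop : Nat → List Char → Bool
  | _, [] => true
  | i, c :: rest =>
    if i = 3 ∨ i = 7 then (if c ≠ '.' then false else pvB_loop (i+1) rest)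
    else if i = 11 then (if c ≠ '-' then false else pvB_loop (i+1) rest)
    else if !PySem.Chars.isdigit c then false
    else pvB_loop (i+1) rest

def VerificarCPF_alt (CPF : String) : Bool :=
  if CPF.toList.length ≠ 14 then false
  else pvB_loop 0 CPF.toList

-- ===== PRECONDITION & SPEC =====
def Spec_VerificarCPF (CPF : String) (out : Bool) : Prop := out = VerificarCPF_alt CPF
instance (CPF : String) (out : Bool) : Decidable (Spec_VerificarCPF CPF out) := by unfold Spec_VerificarCPF; infer_instance

-- ===== CLAIM (what is proved, stated in full; the proofs are below) =====
def Claim_equal_VerificarCPF : Prop := ∀ (CPF : String), Dom_VerificarCPF CPF → Spec_VerificarCPF CPF (VerificarCPF CPF)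

-- ===== LEMMAS AND PROOFS =====

def pvSplit (sep : Char) : List Char → List (List Char)
  | [] => [[]]
  | c :: rest => if c = sep then [] :: pvSplit sep rest else (pvSplit sep rest).modifyHead (c :: ·)

lemma pvSplit_ne_nil (sep : Char) (cs : List Char) : pvSplit sep cs ≠ [] := by
  cases cs with
  | nil => simp [pvSplit]
  | cons c rest =>
    simp only [pvSplit]
    split
    · simp
    · intro h
      exact pvSplit_ne_nil sep rest (List.modifyHead_eq_nil_iff.mp h)

lemma modifyHead_fun_id {α : Type} (l : List α) : List.modifyHead (fun x => x) l = l := by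
  cases l <;> simp

lemma splitOn_go_eq (sep : Char) (cs : List Char) : ∀ (fuel : Nat) (cur : List Char) (acc : List (List Char)),
    cs.length < fuel →
    PySem.Chars.splitOn.go [sep] fuel cs cur acc
      = acc.reverse ++ (pvSplit sep cs).modifyHead (cur.reverse ++ ·) := by
  induction cs with
  | nil =>
    intro fuel cur acc h
    match fuel, h with
    | fuel+1, _ => simp [PySem.Chars.splitOn.go, pvSplit]
  | cons c rest ih =>
    intro fuel cur acc h
    match fuel, h with
    | fuel+1, h =>
      rw [PySem.Chars.splitOn.go]
      by_cases hc : c = sep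
      · subst hc
        rw [if_pos (by simp [List.isPrefixOf])]
        simp only [List.length_cons] at h
        rw [show List.drop [c].length (c :: rest) = rest by simp]
        rw [ih fuel [] _ (Nat.lt_of_succ_lt_succ h)]
        simp [pvSplit, modifyHead_fun_id]
      · rw [if_neg (by simp [List.isPrefixOf]; exact fun hh => hc (by simpa using hh.symm))]
        simp only [List.length_cons] at h
        rw [ih fuel (c :: cur) acc (Nat.lt_of_succ_lt_succ h)]
        simp only [pvSplit, if_neg hc]
        rcases hne : pvSplit sep rest with _ | ⟨p, ps⟩
        · exact absurd hne (pvSplit_ne_nil sep rest)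
        · simp

lemma splitOn_eq (sep : Char) (cs : List Char) :
    PySem.Chars.splitOn cs [sep] = pvSplit sep cs := by
  rw [PySem.Chars.splitOn, splitOn_go_eq sep cs (cs.length+1) [] [] (Nat.lt_succ_self _)]
  simp [modifyHead_fun_id]

def pvJoin (sep : Char) : List (List Char) → List Char
  | [] => []
  | [p] => p
  | p :: ps => p ++ sep :: pvJoin sep ps

lemma pvJoin_cons (sep : Char) (p q : List Char) (ps : List (List Char)) :
    pvJoin sep (p :: q :: ps) = p ++ sep :: pvJoin sep (q :: ps) := rfl

lemma pvSplit_join (sep : Char) (cs : List Char) : pvJoin sep (pvSplit sep cs) = cs := by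
  induction cs with
  | nil => simp [pvSplit, pvJoin]
  | cons c rest ih =>
    simp only [pvSplit]
    by_cases hc : c = sep
    · subst hc
      rw [if_pos rfl]
      rcases hne : pvSplit c rest with _ | ⟨p, ps⟩
      · exact absurd hne (pvSplit_ne_nil c rest)
      · rw [pvJoin_cons]
        simp only [List.nil_append]
        rw [← hne, ih]
    · rw [if_neg hc]
      rcases hne : pvSplit sep rest with _ | ⟨p, ps⟩
      · exact absurd hne (pvSplit_ne_nil sep rest)
      · cases ps with
        | nil => simp only [List.modifyHead]; rw [pvJoin] ; rw [hne] at ih; rw [pvJoin] at ih; rw [ih]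
        | cons q ps' =>
          simp only [List.modifyHead, pvJoin_cons]
          rw [hne] at ih; rw [pvJoin_cons] at ih
          simp [ih]

lemma pvSplit_no_sep (sep : Char) (xs : List Char) (h : sep ∉ xs) : pvSplit sep xs = [xs] := by
  induction xs with
  | nil => rfl
  | cons c rest ih =>
    simp only [List.mem_cons, not_or] at h
    simp only [pvSplit, if_neg (fun hh : c = sep => h.1 hh.symm)]
    rw [ih h.2]
    rfl

lemma pvSplit_append_sep (sep : Char) (xs ys : List Char) (h : sep ∉ xs) :
    pvSplit sep (xs ++ sep :: ys) = xs :: pvSplit sep ys := by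
  induction xs with
  | nil => simp [pvSplit]
  | cons c rest ih =>
    simp only [List.mem_cons, not_or] at h
    simp only [List.cons_append, pvSplit, if_neg (fun hh : c = sep => h.1 hh.symm)]
    rw [ih h.2]
    rfl

lemma pvB_iff (c0 c1 c2 c3 c4 c5 c6 c7 c8 c9 c10 c11 c12 c13 : Char) :
    pvB_loop 0 [c0,c1,c2,c3,c4,c5,c6,c7,c8,c9,c10,c11,c12,c13] = true ↔
      (PySem.Chars.isdigit c0 ∧ PySem.Chars.isdigit c1 ∧ PySem.Chars.isdigit c2 ∧ c3 = '.' ∧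
       PySem.Chars.isdigit c4 ∧ PySem.Chars.isdigit c5 ∧ PySem.Chars.isdigit c6 ∧ c7 = '.' ∧
       PySem.Chars.isdigit c8 ∧ PySem.Chars.isdigit c9 ∧ PySem.Chars.isdigit c10 ∧ c11 = '-' ∧
       PySem.Chars.isdigit c12 ∧ PySem.Chars.isdigit c13) := by
  simp [pvB_loop]

lemma pv_ne_of_isdigit (c c' : Char) (h : PySem.Chars.isdigit c = true) (h' : c' < '0') :
    c' ≠ c := by
  simp only [PySem.Chars.isdigit, Bool.and_eq_true, decide_eq_true_eq] at h
  intro he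
  exact absurd (he ▸ h.1) (not_le.mpr h')

lemma pv_main (CPF : String) : VerificarCPF CPF = VerificarCPF_alt CPF := by
  unfold VerificarCPF VerificarCPF_alt
  generalize CPF.toList = cs
  by_cases hlen : cs.length = 14
  case neg => rw [if_pos (by omega), if_pos (by omega)]
  conv_rhs => rw [if_neg (show ¬cs.length ≠ 14 from by omega)]
  rw [if_neg (show ¬cs.length ≠ 14 from by omega)]
  simp only [splitOn_eq]
  rw [Bool.eq_iff_iff]
  constructor
  · intro hA
    split_ifs at hA with h1 h2 h3
    -- h1 : ¬ length ≠ 3, h2 : ¬ pvA_parts2 = false, h3 : ¬ bigcond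
    have hp : (pvSplit '.' cs).length = 3 := by omega
    obtain ⟨p0, p1, p2, hps⟩ := List.length_eq_three.mp hp
    have hjoin := pvSplit_join '.' cs
    rw [hps] at h2 h3 hjoin
    simp only [Bool.not_eq_false] at h2
    simp only [List.take, pvA_parts2] at h2
    have hpa : p0.length = 3 ∧ PySem.Chars.strIsdigit p0 = true ∧
        p1.length = 3 ∧ PySem.Chars.strIsdigit p1 = true := by
      by_cases e0 : p0.length = 3 <;> by_cases d0 : PySem.Chars.strIsdigit p0 = true <;>
        by_cases e1 : p1.length = 3 <;> by_cases d1 : PySem.Chars.strIsdigit p1 = true <;>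
        simp [e0, d0, e1, d1] at h2
      exact ⟨e0, d0, e1, d1⟩
    simp only [List.getD_cons_succ, List.getD_cons_zero, Bool.or_eq_true, decide_eq_true_eq,
      Bool.not_eq_true', not_or, Bool.not_eq_false] at h3
    obtain ⟨⟨⟨⟨hq2, hq0len⟩, hq0dig⟩, hq1len⟩, hq1dig⟩ := h3
    have hq : (pvSplit '-' p2).length = 2 := by omega
    obtain ⟨q0, q1, hqs⟩ := List.length_eq_two.mp hq
    rw [hqs] at hq0len hq0dig hq1len hq1dig
    simp only [List.getD_cons_succ, List.getD_cons_zero] at hq0len hq0dig hq1len hq1dig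
    have hjoin2 := pvSplit_join '-' p2
    rw [hqs] at hjoin2
    simp only [pvJoin] at hjoin hjoin2
    obtain ⟨a0,a1,a2,rfl⟩ := List.length_eq_three.mp hpa.1
    obtain ⟨b0,b1,b2,rfl⟩ := List.length_eq_three.mp hpa.2.2.1
    obtain ⟨d0,d1,d2,rfl⟩ := List.length_eq_three.mp (show q0.length = 3 by omega)
    obtain ⟨e0,e1,rfl⟩ := List.length_eq_two.mp (show q1.length = 2 by omega)
    rw [← hjoin2] at hjoin
    rw [← hjoin]
    simp only [List.cons_append, List.nil_append]
    rw [pvB_iff]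
    have hd0 := hpa.2.1; have hd1 := hpa.2.2.2
    simp only [PySem.Chars.strIsdigit, Bool.and_eq_true, List.all_eq_true, List.mem_cons] at hd0 hd1 hq0dig hq1dig
    exact ⟨hd0.2 _ (by simp), hd0.2 _ (by simp), hd0.2 _ (by simp), rfl,
           hd1.2 _ (by simp), hd1.2 _ (by simp), hd1.2 _ (by simp), rfl,
           hq0dig.2 _ (by simp), hq0dig.2 _ (by simp), hq0dig.2 _ (by simp), rfl,
           hq1dig.2 _ (by simp), hq1dig.2 _ (by simp)⟩
  · intro hB
    obtain ⟨c0, cs, rfl⟩ := List.exists_of_length_succ cs hlen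
    replace hlen : cs.length = 13 := by simp only [List.length_cons] at hlen; omega
    obtain ⟨c1, cs, rfl⟩ := List.exists_of_length_succ cs hlen
    replace hlen : cs.length = 12 := by simp only [List.length_cons] at hlen; omega
    obtain ⟨c2, cs, rfl⟩ := List.exists_of_length_succ cs hlen
    replace hlen : cs.length = 11 := by simp only [List.length_cons] at hlen; omega
    obtain ⟨c3, cs, rfl⟩ := List.exists_of_length_succ cs hlen
    replace hlen : cs.length = 10 := by simp only [List.length_cons] at hlen; omega
    obtain ⟨c4, cs, rfl⟩ := List.exists_of_length_succ cs hlen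
    replace hlen : cs.length = 9 := by simp only [List.length_cons] at hlen; omega
    obtain ⟨c5, cs, rfl⟩ := List.exists_of_length_succ cs hlen
    replace hlen : cs.length = 8 := by simp only [List.length_cons] at hlen; omega
    obtain ⟨c6, cs, rfl⟩ := List.exists_of_length_succ cs hlen
    replace hlen : cs.length = 7 := by simp only [List.length_cons] at hlen; omega
    obtain ⟨c7, cs, rfl⟩ := List.exists_of_length_succ cs hlen
    replace hlen : cs.length = 6 := by simp only [List.length_cons] at hlen; omega
    obtain ⟨c8, cs, rfl⟩ := List.exists_of_length_succ cs hlen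
    replace hlen : cs.length = 5 := by simp only [List.length_cons] at hlen; omega
    obtain ⟨c9, cs, rfl⟩ := List.exists_of_length_succ cs hlen
    replace hlen : cs.length = 4 := by simp only [List.length_cons] at hlen; omega
    obtain ⟨c10, cs, rfl⟩ := List.exists_of_length_succ cs hlen
    replace hlen : cs.length = 3 := by simp only [List.length_cons] at hlen; omega
    obtain ⟨c11, cs, rfl⟩ := List.exists_of_length_succ cs hlen
    replace hlen : cs.length = 2 := by simp only [List.length_cons] at hlen; omega
    obtain ⟨c12, cs, rfl⟩ := List.exists_of_length_succ cs hlen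
    replace hlen : cs.length = 1 := by simp only [List.length_cons] at hlen; omega
    obtain ⟨c13, cs, rfl⟩ := List.exists_of_length_succ cs hlen
    replace hlen : cs.length = 0 := by simp only [List.length_cons] at hlen; omega
    rw [List.length_eq_zero_iff.mp hlen]
    rw [List.length_eq_zero_iff.mp hlen] at hB
    rw [pvB_iff] at hB
    obtain ⟨g0, g1, g2, rfl, g4, g5, g6, rfl, g8, g9, g10, rfl, g12, g13⟩ := hB
    have hsplit : pvSplit '.' [c0,c1,c2,'.',c4,c5,c6,'.',c8,c9,c10,'-',c12,c13]
        = [[c0,c1,c2], [c4,c5,c6], [c8,c9,c10,'-',c12,c13]] := by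
      rw [show [c0,c1,c2,'.',c4,c5,c6,'.',c8,c9,c10,'-',c12,c13]
            = [c0,c1,c2] ++ '.' :: ([c4,c5,c6] ++ '.' :: [c8,c9,c10,'-',c12,c13]) from rfl]
      rw [pvSplit_append_sep '.' _ _ (by
        simp only [List.mem_cons, List.not_mem_nil, or_false, not_or]
        exact ⟨pv_ne_of_isdigit _ _ g0 (by decide), pv_ne_of_isdigit _ _ g1 (by decide),
               pv_ne_of_isdigit _ _ g2 (by decide)⟩)]
      rw [pvSplit_append_sep '.' _ _ (by
        simp only [List.mem_cons, List.not_mem_nil, or_false, not_or]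
        exact ⟨pv_ne_of_isdigit _ _ g4 (by decide), pv_ne_of_isdigit _ _ g5 (by decide),
               pv_ne_of_isdigit _ _ g6 (by decide)⟩)]
      rw [pvSplit_no_sep '.' _ (by
        simp only [List.mem_cons, List.not_mem_nil, or_false, not_or]
        exact ⟨pv_ne_of_isdigit _ _ g8 (by decide), pv_ne_of_isdigit _ _ g9 (by decide),
               pv_ne_of_isdigit _ _ g10 (by decide), by decide,
               pv_ne_of_isdigit _ _ g12 (by decide), pv_ne_of_isdigit _ _ g13 (by decide)⟩)]
    rw [hsplit]
    have hsplit2 : pvSplit '-' [c8,c9,c10,'-',c12,c13] = [[c8,c9,c10],[c12,c13]] := by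
      rw [show [c8,c9,c10,'-',c12,c13] = [c8,c9,c10] ++ '-' :: [c12,c13] from rfl]
      rw [pvSplit_append_sep '-' _ _ (by
        simp only [List.mem_cons, List.not_mem_nil, or_false, not_or]
        exact ⟨pv_ne_of_isdigit _ _ g8 (by decide), pv_ne_of_isdigit _ _ g9 (by decide),
               pv_ne_of_isdigit _ _ g10 (by decide)⟩)]
      rw [pvSplit_no_sep '-' _ (by
        simp only [List.mem_cons, List.not_mem_nil, or_false, not_or]
        exact ⟨pv_ne_of_isdigit _ _ g12 (by decide), pv_ne_of_isdigit _ _ g13 (by decide)⟩)]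
    rw [if_neg (by simp)]
    rw [if_neg (by simp [pvA_parts2, PySem.Chars.strIsdigit, g0, g1, g2, g4, g5, g6])]
    simp only [List.getD_cons_succ, List.getD_cons_zero, hsplit2]
    rw [if_neg (by simp [PySem.Chars.strIsdigit, g8, g9, g10, g12, g13])]

-- ===== VERDICT (by name: the statement is the Claim_ definition above) =====
theorem VerificarCPF_spec : Claim_equal_VerificarCPF := by
  intro CPF _
  exact pv_main CPF
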